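-- pv_equiv track=rewrite | github.com/kendax/calculator-py-internal | calcpy/calc/views.py | period_in_last_operand
-- ===== SOURCE A (Python) =====
-- def is_special_character(c):
--     """Function to check if a character is an operator"""
--     operators = "([*\\-+*/()])"
--     return c in operators
--
-- def period_in_last_operand(input_list):
--     """Check whether there is a period in the last number occurring after an operator"""
--     last_operator_index = -1
--
--     # Find the index of the last operator in the list
--     for i in range(len(input_list)):
--         if is_special_character(input_list[i]):
--             last_operator_index = i
--
--     # If an operator is found, check for a period in the substring from that
--     # index to the end
--     if last_operator_index != -1:
--         for i in range(last_operator_index, len(input_list)):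
--             if input_list[i] == ".":
--                 return True
--
--     return False
-- ===== SOURCE B (Python) =====
-- def is_special_character(c):
--     """Function to check if a character is an operator"""
--     operators = "([*\\-+*/()])"
--     return c in operators
--
-- def period_in_last_operand(input_list):
--     """Check whether there is a period in the last number occurring after an operator"""
--     seen_period = False
--     for x in reversed(input_list):
--         if x == ".":
--             seen_period = True
--         elif is_special_character(x):
--             return seen_period
--     return False
-- ===== Notes on version B (the rewrite author's own statement) =====
-- stated objective: simpler
-- what changed: Replaces A's two forward index passes (find last operator index, then scan from it for a period) with a single reverse pass carrying a seen_period flag that is returned at the first operator encountered.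
import Mathlib
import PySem

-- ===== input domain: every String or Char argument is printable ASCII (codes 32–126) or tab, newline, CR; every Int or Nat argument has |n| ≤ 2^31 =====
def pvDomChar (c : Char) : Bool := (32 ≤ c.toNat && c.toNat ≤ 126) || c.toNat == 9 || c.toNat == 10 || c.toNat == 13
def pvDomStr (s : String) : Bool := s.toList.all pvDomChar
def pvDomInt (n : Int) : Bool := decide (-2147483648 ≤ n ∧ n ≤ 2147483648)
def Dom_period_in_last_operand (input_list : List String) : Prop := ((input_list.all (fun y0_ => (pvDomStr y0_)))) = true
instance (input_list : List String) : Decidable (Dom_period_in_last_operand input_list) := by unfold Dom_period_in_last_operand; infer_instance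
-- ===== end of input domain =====

-- B replaces A's two forward index passes by one reverse pass with a seen-period flag (objective: simpler).

-- ===== PORT A =====
-- shared helper: Python's `c in "([*\\-+*/()])"` is substring containment
def is_special_character (c : String) : Bool :=
  PySem.Str.isIn c "([*\\-+*/()])"

def period_in_last_operand (input_list : List String) : Bool :=
  let last_operator_index : Int :=
    (PySem.List.pyRange 0 (input_list.length : Int) 1).foldl
      (fun acc i => if is_special_character (PySem.List.pyGetD input_list i "") then i else acc)
      (-1)
  if last_operator_index ≠ -1 then
    (PySem.List.pyRange last_operator_index (input_list.length : Int) 1).any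
      (fun i => PySem.List.pyGetD input_list i "" == ".")
  else
    false

-- ===== PORT B =====
-- reverse pass of Source B: walk the reversed list carrying the seen_period flag
def pv_revGo : List String → Bool → Bool
  | [], _ => false
  | x :: rest, seen =>
    if x == "." then pv_revGo rest true
    else if is_special_character x then seen
    else pv_revGo rest seen

def period_in_last_operand_alt (input_list : List String) : Bool :=
  pv_revGo input_list.reverse false

-- ===== PRECONDITION & SPEC =====
def Spec_period_in_last_operand (input_list : List String) (out : Bool) : Prop := out = period_in_last_operand_alt input_list
instance (input_list : List String) (out : Bool) : Decidable (Spec_period_in_last_operand input_list out) := by unfold Spec_period_in_last_operand; infer_instance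

-- ===== CLAIM (what is proved, stated in full; the proofs are below) =====
def Claim_equal_period_in_last_operand : Prop := ∀ (input_list : List String), Dom_period_in_last_operand input_list → Spec_period_in_last_operand input_list (period_in_last_operand input_list)

-- ===== LEMMAS AND PROOFS =====

-- A's first loop, rephrased over `enumerate` (same fold, index paired with element)
def pvLastIdx (xs : List String) : Int :=
  (PySem.List.enumerate xs 0).foldl
    (fun acc p => if is_special_character p.2 then p.1 else acc) (-1)

lemma pvLastIdx_eq_port (xs : List String) :
    (PySem.List.pyRange 0 (xs.length : Int) 1).foldl
      (fun acc i => if is_special_character (PySem.List.pyGetD xs i "") then i else acc) (-1)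
    = pvLastIdx xs := by
  unfold pvLastIdx
  rw [PySem.List.enumerate_eq_map_pyRange (d := "")]
  rw [List.foldl_map]
  simp [PySem.List.len_eq]

lemma pvLastIdx_append (xs : List String) (x : String) :
    pvLastIdx (xs ++ [x])
      = if is_special_character x then (xs.length : Int) else pvLastIdx xs := by
  unfold pvLastIdx
  rw [PySem.List.enumerate_append]
  simp

-- range/bounds facts about the fold result
lemma pvLastIdx_spec (xs : List String) :
    (pvLastIdx xs = -1 ∧ xs.any is_special_character = false) ∨
    (0 ≤ pvLastIdx xs ∧ pvLastIdx xs < (xs.length : Int) ∧ xs.any is_special_character = true) := by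
  induction xs using List.reverseRecOn with
  | nil => left; simp [pvLastIdx, PySem.List.enumerate]
  | append_singleton xs x ih =>
    rw [pvLastIdx_append]
    by_cases hx : is_special_character x
    · right
      refine ⟨by simp [hx], ?_, by simp [hx]⟩
      simp only [hx, if_true, List.length_append, List.length_cons, List.length_nil]
      push_cast
      omega
    · rcases ih with ⟨h1, h2⟩ | ⟨h1, h2, h3⟩
      · left; simp [hx, h1, h2]
      · right
        refine ⟨by simp [hx]; omega, ?_, by simp [hx, h3]⟩
        simp only [hx, List.length_append, List.length_cons, List.length_nil]
        push_cast
        omega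

-- the flag-true run of B's loop returns true iff a special element exists
lemma pv_revGo_true (l : List String) :
    pv_revGo l true = l.any is_special_character := by
  induction l with
  | nil => simp [pv_revGo]
  | cons x rest ih =>
    by_cases hx : x = "."
    · have hns : is_special_character "." = false := by decide
      subst hx
      simp [pv_revGo, hns, ih]
    · by_cases hs : is_special_character x
      · simp [pv_revGo, hx, hs]
      · simp [pv_revGo, hx, hs, ih]

-- "." is not a special character
lemma pv_dot_not_special : is_special_character "." = false := by decide

-- the list-level reading of A (after both passes are rewritten)
def pvAcore (xs : List String) : Bool :=
  if pvLastIdx xs = -1 then false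
  else (xs.drop (pvLastIdx xs).toNat).any (· == ".")

lemma pvAcore_eq_alt (xs : List String) :
    pvAcore xs = period_in_last_operand_alt xs := by
  unfold period_in_last_operand_alt
  induction xs using List.reverseRecOn with
  | nil => simp [pvAcore, pvLastIdx, pv_revGo, PySem.List.enumerate]
  | append_singleton xs x ih =>
    rw [List.reverse_append]
    simp only [List.reverse_singleton, List.singleton_append]
    rcases pvLastIdx_spec xs with ⟨h1, h2⟩ | ⟨h1, h2, h3⟩
    · -- no special element in xs
      by_cases hs : is_special_character x
      · -- last operator is x itself; the tail after it is [x], and x ≠ "."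
        have hxd : x ≠ "." := by
          intro h; subst h; exact absurd hs (by simp [pv_dot_not_special])
        unfold pvAcore
        rw [pvLastIdx_append]
        simp [hs, pv_revGo, hxd]
      · by_cases hxd : x = "."
        · subst hxd
          unfold pvAcore
          rw [pvLastIdx_append]
          simp [hs, h1, pv_revGo, pv_revGo_true, List.any_reverse, h2]
        · unfold pvAcore at ih ⊢
          rw [pvLastIdx_append]
          simp [hs, h1, pv_revGo, hxd] at ih ⊢
          exact ih
    · -- xs has a special element, at index (pvLastIdx xs) < xs.length
      have hk : (pvLastIdx xs).toNat ≤ xs.length := by omega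
      have hdrop : (xs ++ [x]).drop (pvLastIdx xs).toNat
          = xs.drop (pvLastIdx xs).toNat ++ [x] :=
        List.drop_append_of_le_length hk
      have hm1 : pvLastIdx xs ≠ -1 := by omega
      by_cases hs : is_special_character x
      · have hxd : x ≠ "." := by
          intro h; subst h; exact absurd hs (by simp [pv_dot_not_special])
        unfold pvAcore
        rw [pvLastIdx_append]
        simp [hs, pv_revGo, hxd]
      · by_cases hxd : x = "."
        · subst hxd
          unfold pvAcore
          rw [pvLastIdx_append]
          simp [hs, hm1, hdrop, pv_revGo, pv_revGo_true, List.any_reverse, h3]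
        · have hxb : (x == ".") = false := by simpa using hxd
          unfold pvAcore at ih ⊢
          rw [pvLastIdx_append]
          simp only [hs, Bool.false_eq_true, if_false]
          rw [hdrop]
          simp [hm1, pv_revGo, hs, hxb] at ih ⊢
          exact ih

lemma pvA_eq_core (xs : List String) : period_in_last_operand xs = pvAcore xs := by
  unfold period_in_last_operand pvAcore
  rw [pvLastIdx_eq_port]
  by_cases h : pvLastIdx xs = -1
  · simp [h]
  · rcases pvLastIdx_spec xs with ⟨h1, _⟩ | ⟨h1, h2, _⟩
    · exact absurd h1 h
    · simp only [h, if_true, ne_eq, not_false_iff]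
      rw [show (PySem.List.pyRange (pvLastIdx xs) (xs.length : Int) 1).any
            (fun i => PySem.List.pyGetD xs i "" == ".")
          = ((PySem.List.pyRange (pvLastIdx xs) (xs.length : Int) 1).map
              (fun i => PySem.List.pyGetD xs i "")).any (· == ".") by
        simp [List.any_map, Function.comp_def]]
      rw [show ((PySem.List.pyRange (pvLastIdx xs) (xs.length : Int) 1).map
              (fun i => PySem.List.pyGetD xs i "")) = xs.drop (pvLastIdx xs).toNat by
        simpa [PySem.List.len_eq] using PySem.List.map_pyGetD_pyRange (xs := xs) (a := pvLastIdx xs) (d := "") h1]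
      simp

-- ===== VERDICT (by name: the statement is the Claim_ definition above) =====
theorem period_in_last_operand_spec : Claim_equal_period_in_last_operand := by
  intro xs _
  unfold Spec_period_in_last_operand
  rw [pvA_eq_core, pvAcore_eq_alt]
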